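-- pv_equiv track=rewrite | github.com/2BitwiseBard/localforge | src/localforge/agents/base.py | allowed_tools
-- ===== SOURCE A (Python) =====
-- from enum import Enum
--
-- class TrustLevel(str, Enum):
--     MONITOR = "monitor"
--     SAFE = "safe"
--     FULL = "full"
--
-- TRUST_WHITELISTS: dict[TrustLevel, set[str]] = {
--     TrustLevel.MONITOR: {
--         "health_check",
--         "check_model",
--         "get_generation_params",
--         "search_index",
--         "semantic_search",
--         "hybrid_search",
--         "file_qa",
--         "list_notes",
--         "recall_note",
--         "save_note",  # Low-risk write — needed for alerts and notifications
--         "list_indexes",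
--         "list_sessions",
--         "session_stats",
--         "classify_task",
--         "slot_info",
--         "cache_stats",
--         "compute_status",
--         "compute_route",
--     },
--     TrustLevel.SAFE: {
--         # Includes all MONITOR tools plus:
--         "index_directory",
--         "incremental_index",
--         "ingest_document",
--         "save_note",
--         "delete_note",
--         "review_diff",
--         "diff_explain",
--         "analyze_code",
--         "batch_review",
--         "local_chat",
--         "multi_turn_chat",
--         "rag_query",
--         "diff_rag",
--         "summarize_file",
--         "explain_error",
--         "knowledge_base",
--         "doc_lookup",
--         "embed_text",
--         "rerank_chunks",
--         "git_context",
--         "web_search",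
--         "web_fetch",
--         "deep_research",
--         "kg_add",
--         "kg_relate",
--         "kg_query",
--         "compute_status",
--         "compute_route",
--         "mesh_dispatch",
--         "fs_read",
--         "fs_list",
--         "fs_glob",
--         "fs_grep",
--     },
--     TrustLevel.FULL: set(),  # All tools allowed
-- }
--
-- def allowed_tools(trust: TrustLevel) -> set[str]:
--     """Return the set of allowed tool names for a trust level."""
--     if trust == TrustLevel.FULL:
--         return set()  # Empty means all allowed
--     tools = set()
--     for level in TrustLevel:
--         tools |= TRUST_WHITELISTS[level]
--         if level == trust:
--             break
--     return tools
-- ===== SOURCE B (Python) =====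
-- # B: a single flat table mapping each tool to the MINIMUM trust rank that
-- # grants it; allowed_tools filters this table by rank comparison instead of
-- # unioning per-level sets in a loop.
--
-- _LEVEL_RANK = {"monitor": 0, "safe": 1}
--
-- # (tool, minimal trust rank granting it)
-- _TOOL_MIN_LEVEL = [
--     ("health_check", 0),
--     ("check_model", 0),
--     ("get_generation_params", 0),
--     ("search_index", 0),
--     ("semantic_search", 0),
--     ("hybrid_search", 0),
--     ("file_qa", 0),
--     ("list_notes", 0),
--     ("recall_note", 0),
--     ("save_note", 0),
--     ("list_indexes", 0),
--     ("list_sessions", 0),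
--     ("session_stats", 0),
--     ("classify_task", 0),
--     ("slot_info", 0),
--     ("cache_stats", 0),
--     ("compute_status", 0),
--     ("compute_route", 0),
--     ("index_directory", 1),
--     ("incremental_index", 1),
--     ("ingest_document", 1),
--     ("delete_note", 1),
--     ("review_diff", 1),
--     ("diff_explain", 1),
--     ("analyze_code", 1),
--     ("batch_review", 1),
--     ("local_chat", 1),
--     ("multi_turn_chat", 1),
--     ("rag_query", 1),
--     ("diff_rag", 1),
--     ("summarize_file", 1),
--     ("explain_error", 1),
--     ("knowledge_base", 1),
--     ("doc_lookup", 1),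
--     ("embed_text", 1),
--     ("rerank_chunks", 1),
--     ("git_context", 1),
--     ("web_search", 1),
--     ("web_fetch", 1),
--     ("deep_research", 1),
--     ("kg_add", 1),
--     ("kg_relate", 1),
--     ("kg_query", 1),
--     ("mesh_dispatch", 1),
--     ("fs_read", 1),
--     ("fs_list", 1),
--     ("fs_glob", 1),
--     ("fs_grep", 1),
-- ]
--
-- def allowed_tools(trust):
--     """Return the set of allowed tool names for a trust level."""
--     if trust == "full":
--         return set()
--     rank = _LEVEL_RANK.get(trust, 1)
--     return {tool for tool, k in _TOOL_MIN_LEVEL if k <= rank}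
-- ===== Notes on version B (the rewrite author's own statement) =====
-- stated objective: alternative
-- what changed: Replaces the enum loop that unions per-level sets with a flat table mapping each tool to its minimum required trust rank, so allowed_tools is a single filter by rank comparison (unknown trust ranks as safe, matching A's loop that never breaks).
import Mathlib
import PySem

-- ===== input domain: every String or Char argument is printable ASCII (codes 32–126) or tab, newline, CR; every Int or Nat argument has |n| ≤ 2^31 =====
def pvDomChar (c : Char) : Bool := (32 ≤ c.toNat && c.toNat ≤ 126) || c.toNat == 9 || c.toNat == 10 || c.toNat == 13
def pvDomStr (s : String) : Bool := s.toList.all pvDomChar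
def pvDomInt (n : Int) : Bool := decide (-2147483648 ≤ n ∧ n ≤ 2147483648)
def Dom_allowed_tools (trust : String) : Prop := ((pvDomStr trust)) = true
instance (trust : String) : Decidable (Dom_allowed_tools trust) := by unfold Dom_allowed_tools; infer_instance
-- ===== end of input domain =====

-- B replaces A's enum loop with incremental set unions by one flat table mapping
-- each tool to its minimum trust rank, filtered by a rank comparison (objective:
-- alternative). Return-value equivalence only (both Pythons return a fresh set).

-- ===== PORT A =====
-- TRUST_WHITELISTS[MONITOR] as a Python set literal (source order)
def aMonitor : PySem.Set String := PySem.Set.ofList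
  ["health_check", "check_model", "get_generation_params", "search_index",
   "semantic_search", "hybrid_search", "file_qa", "list_notes", "recall_note",
   "save_note", "list_indexes", "list_sessions", "session_stats",
   "classify_task", "slot_info", "cache_stats", "compute_status", "compute_route"]

-- TRUST_WHITELISTS[SAFE] as a Python set literal (source order)
def aSafe : PySem.Set String := PySem.Set.ofList
  ["index_directory", "incremental_index", "ingest_document", "save_note",
   "delete_note", "review_diff", "diff_explain", "analyze_code", "batch_review",
   "local_chat", "multi_turn_chat", "rag_query", "diff_rag", "summarize_file",
   "explain_error", "knowledge_base", "doc_lookup", "embed_text",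
   "rerank_chunks", "git_context", "web_search", "web_fetch", "deep_research",
   "kg_add", "kg_relate", "kg_query", "compute_status", "compute_route",
   "mesh_dispatch", "fs_read", "fs_list", "fs_glob", "fs_grep"]

-- the loop body: 'for level in TrustLevel: tools |= TRUST_WHITELISTS[level]; if level == trust: break'
def aLoop (trust : String) : List (String × PySem.Set String) → PySem.Set String → PySem.Set String
  | [], tools => tools
  | (lvl, w) :: rest, tools =>
      let tools' := PySem.Set.union tools w
      if lvl == trust then tools' else aLoop trust rest tools'

def allowed_tools (trust : String) : List String :=
  if trust == "full" then PySem.Set.empty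
  else aLoop trust [("monitor", aMonitor), ("safe", aSafe), ("full", PySem.Set.empty)] PySem.Set.empty

-- ===== PORT B =====
def bLevelRank : PySem.Dict String Int :=
  ((PySem.Dict.empty).insert "monitor" 0).insert "safe" 1

-- (tool, minimal trust rank granting it)
def bTools : List (String × Int) :=
  [("health_check", 0), ("check_model", 0), ("get_generation_params", 0),
   ("search_index", 0), ("semantic_search", 0), ("hybrid_search", 0),
   ("file_qa", 0), ("list_notes", 0), ("recall_note", 0), ("save_note", 0),
   ("list_indexes", 0), ("list_sessions", 0), ("session_stats", 0),
   ("classify_task", 0), ("slot_info", 0), ("cache_stats", 0),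
   ("compute_status", 0), ("compute_route", 0),
   ("index_directory", 1), ("incremental_index", 1), ("ingest_document", 1),
   ("delete_note", 1), ("review_diff", 1), ("diff_explain", 1),
   ("analyze_code", 1), ("batch_review", 1), ("local_chat", 1),
   ("multi_turn_chat", 1), ("rag_query", 1), ("diff_rag", 1),
   ("summarize_file", 1), ("explain_error", 1), ("knowledge_base", 1),
   ("doc_lookup", 1), ("embed_text", 1), ("rerank_chunks", 1),
   ("git_context", 1), ("web_search", 1), ("web_fetch", 1),
   ("deep_research", 1), ("kg_add", 1), ("kg_relate", 1), ("kg_query", 1),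
   ("mesh_dispatch", 1), ("fs_read", 1), ("fs_list", 1), ("fs_glob", 1),
   ("fs_grep", 1)]

def allowed_tools_alt (trust : String) : List String :=
  if trust == "full" then PySem.Set.empty
  else
    let rank := PySem.Dict.getD bLevelRank trust 1
    PySem.Set.ofList ((bTools.filter (fun p => p.2 ≤ rank)).map Prod.fst)

-- ===== PRECONDITION & SPEC =====
def Spec_allowed_tools (trust : String) (out : List String) : Prop := out = allowed_tools_alt trust
instance (trust : String) (out : List String) : Decidable (Spec_allowed_tools trust out) := by unfold Spec_allowed_tools; infer_instance

-- ===== CLAIM =====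
def Claim_equal_allowed_tools : Prop := ∀ (trust : String), Dom_allowed_tools trust → Spec_allowed_tools trust (allowed_tools trust)

-- ===== LEMMAS AND PROOFS =====

-- the two closed-term kernel computations: both ports agree at rank 0 and rank 1
set_option maxRecDepth 40000 in
theorem coreM : PySem.Set.union PySem.Set.empty aMonitor
    = PySem.Set.ofList ((bTools.filter (fun p => p.2 ≤ (0 : Int))).map Prod.fst) := by decide

set_option maxRecDepth 40000 in
theorem coreS : PySem.Set.union (PySem.Set.union PySem.Set.empty aMonitor) aSafe
    = PySem.Set.ofList ((bTools.filter (fun p => p.2 ≤ (1 : Int))).map Prod.fst) := by decide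

theorem bRank (trust : String) (h1 : trust ≠ "full") (h2 : trust ≠ "monitor") :
    allowed_tools_alt trust
      = PySem.Set.ofList ((bTools.filter (fun p => p.2 ≤ (1 : Int))).map Prod.fst) := by
  by_cases h3 : trust = "safe"
  · subst h3; simp [allowed_tools_alt, bLevelRank, PySem.Dict.getD_insert]
  · simp [allowed_tools_alt, bLevelRank, PySem.Dict.getD_insert, h1, h2, h3]

theorem aRest (trust : String) (h1 : trust ≠ "full") (h2 : trust ≠ "monitor") (h3 : trust ≠ "safe") :
    allowed_tools trust
      = PySem.Set.union (PySem.Set.union (PySem.Set.union PySem.Set.empty aMonitor) aSafe) PySem.Set.empty := by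
  simp only [allowed_tools, aLoop, beq_iff_eq, h1, Ne.symm h2, Ne.symm h3, if_false, ite_self]

theorem unionEmptyRight (s : PySem.Set String) : PySem.Set.union s PySem.Set.empty = s := rfl

-- ===== VERDICT =====
set_option maxRecDepth 40000 in
theorem allowed_tools_spec : Claim_equal_allowed_tools := by
  intro trust _
  unfold Spec_allowed_tools
  by_cases h1 : trust = "full"
  · subst h1; rfl
  by_cases h2 : trust = "monitor"
  · subst h2
    have hA : allowed_tools "monitor" = PySem.Set.union PySem.Set.empty aMonitor := by
      simp [allowed_tools, aLoop]
    have hR : PySem.Dict.getD bLevelRank "monitor" 1 = 0 := by decide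
    have hB : allowed_tools_alt "monitor"
        = PySem.Set.ofList ((bTools.filter (fun p => p.2 ≤ (0 : Int))).map Prod.fst) := by
      simp [allowed_tools_alt, hR]
    rw [hA, hB]; exact coreM
  by_cases h3 : trust = "safe"
  · subst h3
    have hA : allowed_tools "safe"
        = PySem.Set.union (PySem.Set.union PySem.Set.empty aMonitor) aSafe := by
      simp [allowed_tools, aLoop]
    rw [hA, bRank "safe" (by decide) (by decide)]; exact coreS
  · rw [aRest trust h1 h2 h3, unionEmptyRight, bRank trust h1 h2]; exact coreS
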